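-- pv_equiv track=rewrite | github.com/aoktay19/PhysicalTherapyTracker | Player.py | group_scores_by_date
-- ===== SOURCE A (Python) =====
-- from collections import defaultdict
--
-- def group_scores_by_date(score_list):
--     grouped_scores = defaultdict(lambda: [None, None, None])
--
--     for ex_date, score_data in score_list:
--         if score_data[0] is None and score_data[1] is None:
--             index = 2
--         elif score_data[0] is None and score_data[2] is None:
--             index = 1
--         else:
--             index = 0
--         score = score_data[index]
--         grouped_scores[ex_date][index] = score
--
--     grouped_scores_list = [[ex_date, scores] for ex_date, scores in grouped_scores.items()]
--     grouped_scores_list.sort(key=lambda x: x[0])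
--     return grouped_scores_list
-- ===== SOURCE B (Python) =====
-- def group_scores_by_date(score_list):
--     # No intermediate dict: sort the distinct dates once, then fill each
--     # date's three slots with one scan over the input.
--     result = []
--     for d in sorted({date for date, _ in score_list}):
--         slots = [None, None, None]
--         for date, score_data in score_list:
--             if date != d:
--                 continue
--             if score_data[0] is None and score_data[1] is None:
--                 index = 2
--             elif score_data[0] is None and score_data[2] is None:
--                 index = 1
--             else:
--                 index = 0
--             slots[index] = score_data[index]
--         result.append([d, slots])
--     return result
-- ===== Notes on version B (the rewrite author's own statement) =====
-- stated objective: alternative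
-- what changed: B keeps no dict: it sorts the distinct dates once and fills each date's three slots with a direct scan over the input, instead of A's defaultdict grouping followed by sorting the items.
import Mathlib
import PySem

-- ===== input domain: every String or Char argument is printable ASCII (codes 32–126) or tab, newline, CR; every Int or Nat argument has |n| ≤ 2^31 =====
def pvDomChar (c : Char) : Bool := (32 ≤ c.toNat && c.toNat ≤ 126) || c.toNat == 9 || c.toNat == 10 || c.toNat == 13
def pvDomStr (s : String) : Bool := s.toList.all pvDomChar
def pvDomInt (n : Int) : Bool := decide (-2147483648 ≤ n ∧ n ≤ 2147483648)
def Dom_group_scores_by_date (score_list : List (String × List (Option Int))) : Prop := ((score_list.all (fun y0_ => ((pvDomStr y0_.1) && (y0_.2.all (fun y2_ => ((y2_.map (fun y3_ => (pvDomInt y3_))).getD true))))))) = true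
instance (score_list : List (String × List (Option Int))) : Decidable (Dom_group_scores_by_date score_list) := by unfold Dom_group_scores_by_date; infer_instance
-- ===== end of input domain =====

-- B drops A's intermediate defaultdict: it sorts the distinct dates once and fills each
-- date's slots by a direct scan over the input (objective: alternative; same results).


-- ===== PORT A =====
-- the None-based index selection (the identical lines appear in both Pythons; helper shared)
def pvSelIdx (sd : List (Option Int)) : Nat :=
  if PySem.List.pyGet? sd 0 = some none ∧ PySem.List.pyGet? sd 1 = some none then 2
  else if PySem.List.pyGet? sd 0 = some none ∧ PySem.List.pyGet? sd 2 = some none then 1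
  else 0

-- score = score_data[index]; slots[index] = score.  Out-of-range reads are IndexError in
-- Python and are excluded by Pre_; the .getD none default is never reached inside Pre_.
def pvApply (slots sd : List (Option Int)) : List (Option Int) :=
  slots.set (pvSelIdx sd) ((PySem.List.pyGet? sd ((pvSelIdx sd : Nat) : Int)).getD none)

def group_scores_by_date (score_list : List (String × List (Option Int))) : List (String × List (Option Int)) :=
  let grouped : PySem.Dict String (List (Option Int)) :=
    score_list.foldl (fun d p => d.modify p.1 [none, none, none] (fun slots => pvApply slots p.2)) PySem.Dict.empty
  let grouped_scores_list := grouped.items.foldl (fun acc p => acc ++ [(p.1, p.2)]) []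
  PySem.List.sorted grouped_scores_list (fun x => x.1) false

-- ===== PORT B =====
def pvSlots (d : String) (score_list : List (String × List (Option Int))) : List (Option Int) :=
  score_list.foldl (fun slots p => if p.1 ≠ d then slots else pvApply slots p.2) [none, none, none]

def group_scores_by_date_alt (score_list : List (String × List (Option Int))) : List (String × List (Option Int)) :=
  let dates := PySem.List.sorted (PySem.Set.ofList (score_list.map (·.1))) (fun x => x) false
  dates.foldl (fun acc d => acc ++ [(d, pvSlots d score_list)]) []

-- ===== PRECONDITION & SPEC =====
-- Pre_ excludes exactly the inputs on which the Pythons raise IndexError: an entry whose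
-- score list is empty, or shorter than 3 when its first score is None.
def Pre_group_scores_by_date (score_list : List (String × List (Option Int))) : Prop :=
  (score_list.all (fun p => if p.2.head? = some (none : Option Int) then decide (3 ≤ p.2.length) else decide (1 ≤ p.2.length))) = true
instance (score_list : List (String × List (Option Int))) : Decidable (Pre_group_scores_by_date score_list) := by unfold Pre_group_scores_by_date; infer_instance

def pvWitness_group_scores_by_date : (List (String × List (Option Int))) :=
  [("2020-01-02", [some 3, none, none]), ("2020-01-01", [none, some 4, none]), ("2020-01-02", [none, none, some 7])]

def Spec_group_scores_by_date (score_list : List (String × List (Option Int))) (out : List (String × List (Option Int))) : Prop := out = group_scores_by_date_alt score_list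
instance (score_list : List (String × List (Option Int))) (out : List (String × List (Option Int))) : Decidable (Spec_group_scores_by_date score_list out) := by unfold Spec_group_scores_by_date; infer_instance

-- ===== CLAIM (what is proved, stated in full; the proofs are below) =====
def Claim_equal_group_scores_by_date : Prop := ∀ (score_list : List (String × List (Option Int))), Dom_group_scores_by_date score_list → Pre_group_scores_by_date score_list → Spec_group_scores_by_date score_list (group_scores_by_date score_list)

-- ===== LEMMAS AND PROOFS =====

-- a modify-loop keyed by p.1: lookup afterwards = fold over the entries with that key
theorem pv_getD_foldl_modify (l : List (String × List (Option Int))) (d0 : PySem.Dict String (List (Option Int))) (c : String) :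
    (l.foldl (fun d p => d.modify p.1 [none, none, none] (fun slots => pvApply slots p.2)) d0).getD c [none, none, none]
      = (l.filter (fun p => p.1 == c)).foldl (fun slots p => pvApply slots p.2) (d0.getD c [none, none, none]) := by
  induction l generalizing d0 with
  | nil => rfl
  | cons x t ih =>
    simp only [List.foldl_cons, List.filter_cons]
    by_cases hx : x.1 = c
    · subst hx
      simp [ih, PySem.Dict.getD_modify_self]
    · have hb : (x.1 == c) = false := by simp [hx]
      simp only [hb, Bool.false_eq_true, if_false, ih]
      rw [PySem.Dict.getD_modify_of_ne d0 [none, none, none] _ (fun h => hx h.symm)]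

theorem pv_slots_eq (c : String) (l : List (String × List (Option Int))) :
    pvSlots c l = (l.filter (fun p => p.1 == c)).foldl (fun slots p => pvApply slots p.2) [none, none, none] := by
  unfold pvSlots
  have h1 : ∀ (acc : List (Option Int)), ∀ x ∈ l,
      (if x.1 ≠ c then acc else pvApply acc x.2) = (if x.1 = c then pvApply acc x.2 else acc) := by
    intro acc x _; by_cases h : x.1 = c <;> simp [h]
  rw [PySem.List.foldl_congr_mem l _ _ _ h1,
      PySem.List.foldl_ite_eq_foldl_filter (fun x : String × List (Option Int) => x.1 = c)
        (fun acc x => pvApply acc x.2) l [none, none, none]]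
  congr 1

-- ===== VERDICT (by name: the statement is the Claim_ definition above) =====
theorem group_scores_by_date_spec : Claim_equal_group_scores_by_date := by
  intro score_list _ _
  unfold Spec_group_scores_by_date group_scores_by_date group_scores_by_date_alt
  simp only [PySem.List.foldl_append_singleton_eq_map, List.nil_append]
  set D := score_list.foldl (fun d p => d.modify p.1 [none, none, none] (fun slots => pvApply slots p.2)) PySem.Dict.empty with hD
  have hnd : D.keys.Nodup := by
    rw [hD]
    exact PySem.Dict.nodup_keys_foldl_modify_key _ _ _ _ _ PySem.Dict.nodup_keys_empty
  have hkeys : D.keys = PySem.Set.ofList (score_list.map (·.1)) := by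
    rw [hD, PySem.Dict.keys_foldl_modify_key]
    simp [PySem.Dict.keys_empty, PySem.Set.update, PySem.Set.ofList_eq_foldl]
  have hitems : D.items = D.keys.map (fun k => (k, D.getD k [none, none, none])) :=
    PySem.Dict.items_eq_map_keys D hnd _
  have hmap : (D.items.map (fun p => (p.1, p.2))) = D.items := by
    simp
  rw [hmap]
  apply PySem.List.sorted_eq_of_perm_of_pairwise_lt
  · -- permutation: sorted distinct dates mapped = permutation of D.items
    have hperm : (PySem.List.sorted (PySem.Set.ofList (score_list.map (·.1))) (fun x => x) false).Perm D.keys := by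
      rw [hkeys]; exact PySem.List.sorted_perm _ _ _
    have := hperm.map (fun k => (k, D.getD k [none, none, none]))
    rw [← hitems] at this
    refine List.Perm.trans (List.Perm.of_eq ?_) this
    apply List.map_congr_left
    intro d hd
    have : pvSlots d score_list = D.getD d [none, none, none] := by
      rw [pv_slots_eq, hD, pv_getD_foldl_modify, PySem.Dict.getD_empty]
    rw [this]
  · -- strictly increasing first components
    have hpl : (PySem.List.sorted (PySem.Set.ofList (score_list.map (·.1))) (fun x => x) false).Pairwise (· < ·) :=
      PySem.List.sorted_ofList_pairwise_lt _
    exact List.Pairwise.map _ (fun a b h => h) hpl
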